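-- pv_equiv track=rewrite | github.com/ankitshah009/leetcode_python | 514-freedom_trail.py | findRotateSteps
-- ===== SOURCE A (Python) =====
-- from functools import lru_cache
-- from collections import defaultdict
--
-- def findRotateSteps(ring: str, key: str) -> int:
--     n = len(ring)
--
--     # Build index map: character -> list of positions
--     char_pos = defaultdict(list)
--     for i, c in enumerate(ring):
--         char_pos[c].append(i)
--
--     @lru_cache(maxsize=None)
--     def dp(ring_pos, key_idx):
--         if key_idx == len(key):
--             return 0
--
--         min_steps = float('inf')
--         char = key[key_idx]
--
--         for next_pos in char_pos[char]:
--             # Calculate minimum rotation distance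
--             clockwise = abs(next_pos - ring_pos)
--             counter_clockwise = n - clockwise
--             rotation = min(clockwise, counter_clockwise)
--
--             # +1 for pressing the button
--             steps = rotation + 1 + dp(next_pos, key_idx + 1)
--             min_steps = min(min_steps, steps)
--
--         return min_steps
--
--     return dp(0, 0)
-- ===== SOURCE B (Python) =====
-- from collections import defaultdict
--
-- def findRotateSteps(ring: str, key: str) -> int:
--     n = len(ring)
--
--     # char -> list of ring positions
--     char_pos = defaultdict(list)
--     for i, c in enumerate(ring):
--         char_pos[c].append(i)
--
--     # Bottom-up DP over the key, last character first.
--     # cost maps each position p of the current key character to the minimal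
--     # number of steps to press the key suffix starting by pressing at p
--     # (rotation TO p is paid by the previous layer).
--     cost = {q: 0 for q in range(n)}
--     for ch in reversed(key):
--         new_cost = {}
--         for p in char_pos[ch]:
--             best = float('inf')
--             for q, cq in cost.items():
--                 d = abs(p - q)
--                 best = min(best, min(d, n - d) + 1 + cq)
--             new_cost[p] = best
--         cost = new_cost
--
--     if not key:
--         return 0
--     best = float('inf')
--     for p, cp in cost.items():
--         d = abs(p)
--         best = min(best, min(d, n - d) + cp)
--     return best
-- ===== Notes on version B (the rewrite author's own statement) =====
-- stated objective: alternative
-- what changed: Replaces the lru_cache-memoized top-down recursion dp(pos, key_idx) with an explicit bottom-up iterative DP that sweeps the key from its last character to its first, keeping only a dict from current-layer ring positions to suffix costs.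
-- outside the precondition, e.g. on findRotateSteps('ab', 'c'): A returns inf, B returns inf
import Mathlib
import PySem

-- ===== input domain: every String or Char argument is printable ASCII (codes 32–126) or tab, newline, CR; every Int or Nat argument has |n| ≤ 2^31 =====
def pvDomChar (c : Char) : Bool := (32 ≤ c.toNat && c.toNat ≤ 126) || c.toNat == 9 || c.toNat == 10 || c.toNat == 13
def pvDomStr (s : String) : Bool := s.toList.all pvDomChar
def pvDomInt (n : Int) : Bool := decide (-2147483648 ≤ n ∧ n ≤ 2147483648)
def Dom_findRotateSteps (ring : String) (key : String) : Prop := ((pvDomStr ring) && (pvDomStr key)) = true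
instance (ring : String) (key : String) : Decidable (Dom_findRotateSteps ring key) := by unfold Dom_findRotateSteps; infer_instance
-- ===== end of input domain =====

-- B rewrites A's memoized top-down recursion as an explicit bottom-up DP over the key,
-- processed last character first (objective: alternative decomposition, same cost).

-- Shared modelling helper: Python's float('inf') running minimum is modelled as Option Int,
-- none = inf; optMin is Python's min on such values.
def optMin (a b : Option Int) : Option Int :=
  match a, b with
  | none, b => b
  | a, none => a
  | some x, some y => some (min x y)

-- ===== PORT A =====
-- char_pos: defaultdict(list); char_pos[c].append(i) over enumerate(ring)
def buildPosA (rl : List Char) : PySem.Dict Char (List Int) :=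
  (PySem.List.enumerate rl).foldl (fun d ic => d.modify ic.2 [] (· ++ [ic.1])) PySem.Dict.empty

-- dp(ring_pos, key_idx): recursion on the remaining key suffix (lru_cache only memoizes)
def dpA (n : Int) (pos : Char → List Int) : List Char → Int → Option Int
  | [], _ => some 0
  | c :: rest, p =>
      (pos c).foldl (fun minSteps nextPos =>
        let clockwise := |nextPos - p|
        let counterClockwise := n - clockwise
        let rotation := min clockwise counterClockwise
        optMin minSteps ((dpA n pos rest nextPos).map (fun v => rotation + 1 + v))) none

def findRotateSteps (ring : String) (key : String) : Int :=
  let rl := ring.toList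
  let n : Int := rl.length
  let cp := buildPosA rl
  -- dp(0,0); the none (= float('inf')) case lies outside Pre_: A returns a float there
  (dpA n (fun c => cp.getD c []) key.toList 0).getD 0

-- ===== PORT B =====
-- Source B builds char_pos identically (defaultdict + append)
def buildPosB (rl : List Char) : PySem.Dict Char (List Int) :=
  (PySem.List.enumerate rl).foldl (fun d ic => d.modify ic.2 [] (· ++ [ic.1])) PySem.Dict.empty

-- one layer of the bottom-up sweep: new_cost over the positions of the current char
def layerB (n : Int) (cost : List (Int × Option Int)) (ps : List Int) : List (Int × Option Int) :=
  ps.map (fun p =>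
    (p, cost.foldl (fun best qc =>
          let d := |p - qc.1|
          optMin best (qc.2.map (fun v => min d (n - d) + 1 + v))) none))

def findRotateSteps_alt (ring : String) (key : String) : Int :=
  let rl := ring.toList
  let n : Int := rl.length
  let cp := buildPosB rl
  let cost0 : List (Int × Option Int) := (List.range rl.length).map (fun q => (Int.ofNat q, some 0))
  let costF := key.toList.reverse.foldl (fun cost ch => layerB n cost (cp.getD ch [])) cost0
  match key.toList with
  | [] => 0
  | _ =>
      -- final combination from start position 0; none (= float('inf')) lies outside Pre_
      (costF.foldl (fun best pc =>
          let d := |pc.1|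
          optMin best (pc.2.map (fun v => min d (n - d) + v))) none).getD 0

-- ===== PRECONDITION & SPEC =====
-- Pre_ excludes inputs where some key character does not occur in the ring: there the
-- Python A (and B) return float('inf'), a float rather than a value of the declared int type.
def Pre_findRotateSteps (ring : String) (key : String) : Prop :=
  (key.toList.all (fun c => ring.toList.contains c)) = true
instance (ring : String) (key : String) : Decidable (Pre_findRotateSteps ring key) := by
  unfold Pre_findRotateSteps; infer_instance

def pvWitness_findRotateSteps : String × String := ("ab", "b")

def Spec_findRotateSteps (ring : String) (key : String) (out : Int) : Prop :=
  out = findRotateSteps_alt ring key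
instance (ring : String) (key : String) (out : Int) : Decidable (Spec_findRotateSteps ring key out) := by
  unfold Spec_findRotateSteps; infer_instance

-- ===== CLAIM =====
def Claim_equal_findRotateSteps : Prop :=
  ∀ (ring : String) (key : String), Dom_findRotateSteps ring key →
    Pre_findRotateSteps ring key → Spec_findRotateSteps ring key (findRotateSteps ring key)

-- ===== LEMMAS AND PROOFS =====

theorem optMin_none_right (a : Option Int) : optMin a none = a := by
  cases a <;> rfl

theorem optMin_map_add (c : Int) (a b : Option Int) :
    optMin (a.map (fun v => c + v)) (b.map (fun v => c + v)) = (optMin a b).map (fun v => c + v) := by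
  cases a <;> cases b <;> simp [optMin, min_add_add_left]

-- running minimum as a fold
def foldMin {α : Type} (f : α → Option Int) (l : List α) : Option Int :=
  l.foldl (fun a x => optMin a (f x)) none

theorem foldl_optMin_acc {α : Type} (f : α → Option Int) (l : List α) (acc : Option Int) :
    l.foldl (fun a x => optMin a (f x)) acc = optMin acc (foldMin f l) := by
  induction l generalizing acc with
  | nil => simp [foldMin, optMin_none_right]
  | cons x xs ih =>
      simp only [foldMin, List.foldl_cons]
      rw [ih, ih (optMin none (f x))]
      cases acc <;> cases f x <;> cases foldMin f xs <;> simp [optMin, min_assoc]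

theorem foldMin_cons {α : Type} (f : α → Option Int) (x : α) (xs : List α) :
    foldMin f (x :: xs) = optMin (f x) (foldMin f xs) := by
  simp only [foldMin, List.foldl_cons]
  rw [foldl_optMin_acc]
  cases f x <;> rfl

theorem foldMin_congr {α : Type} (f g : α → Option Int) (l : List α)
    (h : ∀ x ∈ l, f x = g x) : foldMin f l = foldMin g l := by
  induction l with
  | nil => rfl
  | cons x xs ih =>
      rw [foldMin_cons, foldMin_cons, h x (List.mem_cons_self), ih (fun y hy => h y (List.mem_cons_of_mem _ hy))]

theorem foldMin_map_add {α : Type} (c : Int) (f : α → Option Int) (l : List α) :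
    foldMin (fun x => (f x).map (fun v => c + v)) l = (foldMin f l).map (fun v => c + v) := by
  induction l with
  | nil => rfl
  | cons x xs ih =>
      rw [foldMin_cons, foldMin_cons, ih, optMin_map_add]

theorem foldMin_map {α β : Type} (g : α → β) (f : β → Option Int) (l : List α) :
    foldMin f (l.map g) = foldMin (fun x => f (g x)) l := by
  unfold foldMin
  rw [List.foldl_map]

theorem foldMin_lb {α : Type} (f : α → Option Int) (l : List α) (c : Int)
    (h : ∀ y ∈ l, ∀ v, f y = some v → c ≤ v) :
    ∀ w, foldMin f l = some w → c ≤ w := by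
  induction l with
  | nil => intro w hw; simp [foldMin] at hw
  | cons x xs ih =>
      intro w hw
      rw [foldMin_cons] at hw
      have ihs := ih (fun y hy v hv => h y (List.mem_cons_of_mem _ hy) v hv)
      have hx := fun v hv => h x List.mem_cons_self v hv
      cases hfx : f x with
      | none =>
          rw [hfx] at hw
          cases hfs : foldMin f xs with
          | none => rw [hfs] at hw; exact absurd hw (by simp [optMin])
          | some z =>
              rw [hfs] at hw
              have hzw : z = w := by simpa [optMin] using hw
              subst hzw; exact ihs z hfs
      | some u =>
          rw [hfx] at hw
          cases hfs : foldMin f xs with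
          | none =>
              rw [hfs] at hw
              have huw : u = w := by simpa [optMin] using hw
              subst huw; exact hx u hfx
          | some z =>
              rw [hfs] at hw
              have hmw : min u z = w := by simpa [optMin] using hw
              subst hmw
              have h1 := hx u hfx
              have h2 := ihs z hfs
              omega

theorem foldMin_ub {α : Type} (f : α → Option Int) (l : List α) (c : Int) (x : α)
    (hmem : x ∈ l) (hx : f x = some c) :
    ∃ w, foldMin f l = some w ∧ w ≤ c := by
  induction l with
  | nil => cases hmem
  | cons y ys ih =>
      rw [foldMin_cons]
      rcases List.mem_cons.mp hmem with h | h
      · subst h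
        rw [hx]
        cases hfs : foldMin f ys with
        | none => exact ⟨c, rfl, le_refl c⟩
        | some z => exact ⟨min c z, rfl, min_le_left _ _⟩
      · obtain ⟨w, hw, hwc⟩ := ih h
        rw [hw]
        cases hfy : f y with
        | none => exact ⟨w, rfl, hwc⟩
        | some u => exact ⟨min u w, rfl, le_trans (min_le_right _ _) hwc⟩

theorem foldMin_eq_some_of {α : Type} (f : α → Option Int) (l : List α) (c : Int) (x : α)
    (hmem : x ∈ l) (hx : f x = some c) (hall : ∀ y ∈ l, ∀ v, f y = some v → c ≤ v) :
    foldMin f l = some c := by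
  obtain ⟨w, hw, hwc⟩ := foldMin_ub f l c x hmem hx
  have := foldMin_lb f l c hall w hw
  rw [hw]
  exact congrArg some (le_antisymm hwc this)

-- positions returned by the char_pos build are ring indices: 0 ≤ p < |ring|
theorem buildPos_aux_bound (l : List (Int × Char)) (d : PySem.Dict Char (List Int))
    (P : Int → Prop)
    (hd : ∀ c p, p ∈ d.getD c [] → P p) (hl : ∀ q ∈ l, P q.1) :
    ∀ c p, p ∈ (l.foldl (fun d ic => d.modify ic.2 [] (· ++ [ic.1])) d).getD c [] → P p := by
  induction l generalizing d with
  | nil => exact hd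
  | cons x xs ih =>
      simp only [List.foldl_cons]
      apply ih
      · intro c p hp
        rw [PySem.Dict.getD_modify] at hp
        split at hp
        · rcases List.mem_append.mp hp with h | h
          · exact hd _ p h
          · rw [List.mem_singleton] at h; subst h; exact hl x List.mem_cons_self
        · exact hd _ p hp
      · exact fun q hq => hl q (List.mem_cons_of_mem _ hq)

theorem buildPosA_bound (rl : List Char) (c : Char) (p : Int)
    (hp : p ∈ (buildPosA rl).getD c []) : 0 ≤ p ∧ p < (rl.length : Int) := by
  refine buildPos_aux_bound _ _ (fun p => 0 ≤ p ∧ p < (rl.length : Int))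
    (fun c p h => by simp [PySem.Dict.getD_empty] at h) ?_ c p hp
  intro q hq
  have : q.1 ∈ (PySem.List.enumerate rl).map (·.1) := List.mem_map_of_mem hq
  rw [PySem.List.map_fst_enumerate] at this
  have := (PySem.List.mem_pyRange_one).mp this
  omega

-- the base layer: min over all ring positions q of dist(p,q)+1+0 is 1, for a valid position p
theorem base_layer_min (n : Nat) (p : Int) (hp : 0 ≤ p ∧ p < (n : Int)) :
    foldMin (fun qc : Int × Option Int =>
        qc.2.map (fun v => min |p - qc.1| ((n : Int) - |p - qc.1|) + 1 + v))
      ((List.range n).map (fun q => (Int.ofNat q, some 0))) = some 1 := by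
  apply foldMin_eq_some_of (x := ((p, some 0) : Int × Option Int))
  · exact List.mem_map.mpr ⟨p.toNat, List.mem_range.mpr (by omega), by
      simp only [Prod.mk.injEq, Int.ofNat_eq_natCast]
      exact ⟨by omega, trivial⟩⟩
  · simp only [Option.map_some, sub_self, abs_zero, Option.some.injEq]
    omega
  · intro y hy v hv
    obtain ⟨q, hq, rfl⟩ := List.mem_map.mp hy
    rw [List.mem_range] at hq
    simp only [Option.map_some, Option.some.injEq, Int.ofNat_eq_natCast] at hv
    have h1 : (0:Int) ≤ |p - (q:Int)| := abs_nonneg _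
    have h2 : |p - (q:Int)| ≤ (n:Int) := abs_le.mpr (by omega)
    omega

-- the bottom-up layer invariant: after processing the key suffix c :: rest, the cost dict
-- maps each p ∈ pos c to 1 + dpA p rest
theorem costAfter_eq (rl : List Char) (pos : Char → List Int)
    (hpos : ∀ c p, p ∈ pos c → 0 ≤ p ∧ p < (rl.length : Int)) :
    ∀ (rest : List Char) (c : Char),
      (c :: rest).reverse.foldl (fun cost ch => layerB (rl.length : Int) cost (pos ch))
          ((List.range rl.length).map (fun q => (Int.ofNat q, some 0)))
        = (pos c).map (fun p => (p, (dpA (rl.length : Int) pos rest p).map (fun v => 1 + v))) := by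
  intro rest
  induction rest with
  | nil =>
      intro c
      simp only [List.reverse_cons, List.reverse_nil, List.nil_append, List.foldl_cons, List.foldl_nil]
      unfold layerB
      apply List.map_congr_left
      intro p hp
      have hb := base_layer_min rl.length p (hpos c p hp)
      rw [show (fun (best : Option Int) (qc : Int × Option Int) =>
            let d := |p - qc.1|
            optMin best (qc.2.map (fun v => min d ((rl.length : Int) - d) + 1 + v)))
          = (fun best qc => optMin best ((fun qc : Int × Option Int =>
              qc.2.map (fun v => min |p - qc.1| ((rl.length : Int) - |p - qc.1|) + 1 + v)) qc)) from rfl]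
      rw [show ((List.range rl.length).map (fun q => (Int.ofNat q, some 0))).foldl
            (fun best qc => optMin best ((fun qc : Int × Option Int =>
              qc.2.map (fun v => min |p - qc.1| ((rl.length : Int) - |p - qc.1|) + 1 + v)) qc)) none
          = foldMin _ _ from rfl]
      rw [hb]
      simp [dpA]
  | cons c' rest' ih =>
      intro c
      have : (c :: c' :: rest').reverse = (c' :: rest').reverse ++ [c] := by
        simp
      rw [this, List.foldl_append, ih c']
      simp only [List.foldl_cons, List.foldl_nil]
      unfold layerB
      apply List.map_congr_left
      intro p hp
      refine congrArg (fun o => (p, o)) ?_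
      rw [show ∀ (L : List (Int × Option Int)), L.foldl (fun best qc =>
            let d := |p - qc.1|
            optMin best (qc.2.map (fun v => min d ((rl.length : Int) - d) + 1 + v))) none
          = foldMin (fun qc : Int × Option Int =>
              qc.2.map (fun v => min |p - qc.1| ((rl.length : Int) - |p - qc.1|) + 1 + v)) L
          from fun L => rfl]
      rw [foldMin_map]
      -- per q: ((dpA q rest').map (1+·)).map (dist+1+·) = (dpA q rest' |>.map (dist+1+·)).map (1+·)
      rw [foldMin_congr _ (fun q => ((dpA (rl.length : Int) pos rest' q).map
            (fun v => min |p - q| ((rl.length : Int) - |p - q|) + 1 + v)).map (fun v => 1 + v)) _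
          (by
            intro q hq
            cases hd : dpA (rl.length : Int) pos rest' q with
            | none => simp [hd]
            | some v => simp only [hd, Option.map_some, Option.some.injEq]; ring)]
      rw [foldMin_map_add]
      refine congrArg (Option.map _) ?_
      -- match dpA's own fold (clockwise = |q - p|)
      show foldMin _ _ = dpA (rl.length : Int) pos (c' :: rest') p
      unfold dpA
      rw [show (fun (minSteps : Option Int) (nextPos : Int) =>
            let clockwise := |nextPos - p|
            let counterClockwise := (rl.length : Int) - clockwise
            let rotation := min clockwise counterClockwise
            optMin minSteps ((dpA (rl.length : Int) pos rest' nextPos).map (fun v => rotation + 1 + v)))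
          = (fun minSteps q => optMin minSteps ((fun q => (dpA (rl.length : Int) pos rest' q).map
              (fun v => min |q - p| ((rl.length : Int) - |q - p|) + 1 + v)) q)) from rfl]
      rw [show ((pos c').foldl (fun minSteps q => optMin minSteps ((fun q =>
            (dpA (rl.length : Int) pos rest' q).map
              (fun v => min |q - p| ((rl.length : Int) - |q - p|) + 1 + v)) q)) none)
          = foldMin _ _ from rfl]
      apply foldMin_congr
      intro q hq
      rw [abs_sub_comm p q]
      cases rest' <;> rfl

theorem buildPosB_eq : buildPosB = buildPosA := rfl

-- the final combination from start 0 equals dpA 0 on the whole key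
theorem final_combine (rl : List Char) (pos : Char → List Int) (c : Char) (rest : List Char) :
    foldMin (fun pc : Int × Option Int =>
        pc.2.map (fun v => min |pc.1| ((rl.length : Int) - |pc.1|) + v))
      ((pos c).map (fun p => (p, (dpA (rl.length : Int) pos rest p).map (fun v => 1 + v))))
      = dpA (rl.length : Int) pos (c :: rest) 0 := by
  rw [foldMin_map]
  rw [foldMin_congr _ (fun p => (dpA (rl.length : Int) pos rest p).map
        (fun v => min |p - 0| ((rl.length : Int) - |p - 0|) + 1 + v)) _
      (by
        intro p hp
        cases hd : dpA (rl.length : Int) pos rest p with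
        | none => simp [hd]
        | some v =>
            simp only [hd, Option.map_some, Option.some.injEq, sub_zero]
            ring)]
  unfold dpA
  rw [show (fun (minSteps : Option Int) (nextPos : Int) =>
        let clockwise := |nextPos - 0|
        let counterClockwise := (rl.length : Int) - clockwise
        let rotation := min clockwise counterClockwise
        optMin minSteps ((dpA (rl.length : Int) pos rest nextPos).map (fun v => rotation + 1 + v)))
      = (fun minSteps p => optMin minSteps ((fun p => (dpA (rl.length : Int) pos rest p).map
          (fun v => min |p - 0| ((rl.length : Int) - |p - 0|) + 1 + v)) p)) from rfl]
  rw [show ((pos c).foldl (fun minSteps p => optMin minSteps ((fun p =>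
        (dpA (rl.length : Int) pos rest p).map
          (fun v => min |p - 0| ((rl.length : Int) - |p - 0|) + 1 + v)) p)) none)
      = foldMin _ _ from rfl]
  apply foldMin_congr
  intro p hp
  cases rest <;> rfl

-- ===== VERDICT =====
theorem findRotateSteps_spec : Claim_equal_findRotateSteps := by
  unfold Claim_equal_findRotateSteps
  intro ring key _ _
  unfold Spec_findRotateSteps findRotateSteps findRotateSteps_alt
  rw [buildPosB_eq]
  cases hk : key.toList with
  | nil => simp [dpA]
  | cons c rest =>
      have hpos : ∀ ch p, p ∈ (buildPosA ring.toList).getD ch [] →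
          0 ≤ p ∧ p < (ring.toList.length : Int) :=
        fun ch p h => buildPosA_bound ring.toList ch p h
      simp only []
      rw [costAfter_eq ring.toList (fun ch => (buildPosA ring.toList).getD ch []) hpos rest c]
      rw [show ∀ (L : List (Int × Option Int)), L.foldl (fun best pc =>
            let d := |pc.1|
            optMin best (pc.2.map (fun v => min d ((ring.toList.length : Int) - d) + v))) none
          = foldMin (fun pc : Int × Option Int =>
              pc.2.map (fun v => min |pc.1| ((ring.toList.length : Int) - |pc.1|) + v)) L
          from fun L => rfl]
      rw [final_combine ring.toList _ c rest]
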